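-- pv_equiv track=rewrite | github.com/isbdead/AISD | Lab3.py | transform_number
-- ===== SOURCE A (Python) =====
-- digit_to_word = {
--     '0': 'ноль',
--     '1': 'один',
--     '2': 'два',
--     '3': 'три',
--     '4': 'четыре',
--     '5': 'пять',
--     '6': 'шесть',
--     '7': 'семь',
--     '8': 'восемь',
--     '9': 'девять'
-- }
--
-- def transform_number(s):
--     result = []
--     for pos, ch in enumerate(s, 1):  # начинаем с позиции 1
--         if pos % 2 == 1 and int(ch) % 2 == 0:
--             result.append(digit_to_word[ch])
--         else:
--             result.append(ch)
--     return ''.join(result)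
-- ===== SOURCE B (Python) =====
-- WORDS = ['ноль', 'один', 'два', 'три', 'четыре',
--          'пять', 'шесть', 'семь', 'восемь', 'девять']
--
--
-- def transform_number(s):
--     # pairwise recursion: consume two characters per step; only the first
--     # of each pair (odd position 1,3,5...) is a replacement candidate
--     def go(chars):
--         if not chars:
--             return ''
--         d = int(chars[0])
--         first = WORDS[d] if d % 2 == 0 else chars[0]
--         if len(chars) == 1:
--             return first
--         return first + chars[1] + go(chars[2:])
--     return go(list(s))
-- ===== Notes on version B (the rewrite author's own statement) =====
-- stated objective: alternative
-- what changed: Replaces A's single enumerate(s,1) loop with position-parity tests and a char-keyed dict by a pairwise recursion that consumes two characters per step (only the first of each pair is a candidate) and looks the word up in a list indexed by the digit's integer value.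
import Mathlib
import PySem

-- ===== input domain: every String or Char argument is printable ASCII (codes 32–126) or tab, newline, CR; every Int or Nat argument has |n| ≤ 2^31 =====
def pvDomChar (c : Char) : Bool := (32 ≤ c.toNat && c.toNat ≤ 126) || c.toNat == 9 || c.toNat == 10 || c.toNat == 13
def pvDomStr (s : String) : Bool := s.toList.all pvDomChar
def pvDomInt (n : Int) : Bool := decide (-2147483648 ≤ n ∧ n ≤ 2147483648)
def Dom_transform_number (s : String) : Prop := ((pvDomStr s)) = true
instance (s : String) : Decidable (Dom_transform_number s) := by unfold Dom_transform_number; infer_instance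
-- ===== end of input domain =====

-- B replaces A's single indexed loop by a pairwise recursion (two characters per
-- step) with the words held in a list indexed by the digit's value instead of a
-- dict keyed by the character; objective: alternative decomposition, same cost.

-- ===== PORT A =====
def digit_to_word : PySem.Dict Char String := PySem.Dict.ofList
  [('0', "ноль"), ('1', "один"), ('2', "два"), ('3', "три"), ('4', "четыре"),
   ('5', "пять"), ('6', "шесть"), ('7', "семь"), ('8', "восемь"), ('9', "девять")]

-- the exceptional paths (int(ch) ValueError) are outside Pre_; there the port
-- falls to the else-branch (getD defaults are never reached inside Pre_)
def transform_number (s : String) : String :=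
  String.join ((PySem.List.enumerate s.toList 1).map (fun p =>
    let pos := p.1
    let ch := p.2
    if pos % 2 == 1 && ((PySem.Int.ofStr? (String.ofList [ch])).getD 1) % 2 == 0 then
      (digit_to_word.get? ch).getD (String.ofList [ch])
    else
      String.ofList [ch]))

-- ===== PORT B =====
def WORDS : List String :=
  ["ноль", "один", "два", "три", "четыре", "пять", "шесть", "семь", "восемь", "девять"]

def tnFirst (c : Char) : String :=
  let d := (PySem.Int.ofStr? (String.ofList [c])).getD 1
  if d % 2 == 0 then (PySem.List.pyGet? WORDS d).getD (String.ofList [c]) else String.ofList [c]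

def tnGo : List Char → String
  | [] => ""
  | [c] => tnFirst c
  | c :: d :: rest => tnFirst c ++ String.ofList [d] ++ tnGo rest

def transform_number_alt (s : String) : String := tnGo s.toList

-- ===== PRECONDITION & SPEC =====
-- Pre_ excludes exactly the inputs where A raises ValueError: a non-digit
-- character at an odd position (1-based), i.e. at an even 0-based index.
def Pre_transform_number (s : String) : Prop :=
  ∀ p ∈ PySem.List.enumerate s.toList 1,
    p.1 % 2 = 1 → p.2 ∈ ['0', '1', '2', '3', '4', '5', '6', '7', '8', '9']
instance (s : String) : Decidable (Pre_transform_number s) := by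
  unfold Pre_transform_number; infer_instance

def pvWitness_transform_number : String := "2x4"

def Spec_transform_number (s : String) (out : String) : Prop := out = transform_number_alt s
instance (s : String) (out : String) : Decidable (Spec_transform_number s out) := by
  unfold Spec_transform_number; infer_instance

-- ===== CLAIM (what is proved, stated in full; the proofs are below) =====
def Claim_equal_transform_number : Prop :=
  ∀ (s : String), Dom_transform_number s → Pre_transform_number s →
    Spec_transform_number s (transform_number s)

-- ===== LEMMAS AND PROOFS =====

def tnStep (p : Int × Char) : String :=
  let pos := p.1
  let ch := p.2
  if pos % 2 == 1 && ((PySem.Int.ofStr? (String.ofList [ch])).getD 1) % 2 == 0 then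
    (digit_to_word.get? ch).getD (String.ofList [ch])
  else
    String.ofList [ch]

lemma tnStep_odd (c : Char) (n : Int) (hn : n % 2 = 1)
    (hc : c ∈ ['0', '1', '2', '3', '4', '5', '6', '7', '8', '9']) :
    tnStep (n, c) = tnFirst c := by
  fin_cases hc <;> simp [tnStep, tnFirst, hn] <;> decide

lemma tnStep_even (c : Char) (n : Int) (hn : n % 2 = 0) :
    tnStep (n, c) = String.ofList [c] := by
  simp [tnStep, hn]

lemma foldl_str (l : List String) (a : String) :
    l.foldl (· ++ ·) a = a ++ l.foldl (· ++ ·) "" := by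
  induction l generalizing a with
  | nil => simp
  | cons b l ih => rw [List.foldl_cons, List.foldl_cons, ih (a ++ b), ih ("" ++ b),
      String.append_assoc, String.empty_append]

lemma join_cons (a : String) (l : List String) :
    String.join (a :: l) = a ++ String.join l := by
  simp only [String.join, List.foldl_cons]
  exact (foldl_str l a).trans (by simp)

lemma tnGo_eq (l : List Char) (n : Int) (hn : n % 2 = 1)
    (h : ∀ p ∈ PySem.List.enumerate l n,
      p.1 % 2 = 1 → p.2 ∈ ['0', '1', '2', '3', '4', '5', '6', '7', '8', '9']) :
    String.join ((PySem.List.enumerate l n).map tnStep) = tnGo l := by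
  induction l using tnGo.induct generalizing n with
  | case1 => simp [PySem.List.enumerate_nil, String.join, tnGo]
  | case2 c =>
    have hc := h (n, c) (by simp [PySem.List.enumerate_cons, PySem.List.enumerate_nil]) hn
    simp [PySem.List.enumerate_cons, PySem.List.enumerate_nil, tnGo,
      tnStep_odd c n hn hc, String.join]
  | case3 c d rest ih =>
    have hc := h (n, c) (by simp [PySem.List.enumerate_cons]) hn
    have hn1 : (n + 1) % 2 = 0 := by omega
    have hn2 : (n + 1 + 1) % 2 = 1 := by omega
    have hrest : ∀ p ∈ PySem.List.enumerate rest (n + 1 + 1),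
        p.1 % 2 = 1 → p.2 ∈ ['0', '1', '2', '3', '4', '5', '6', '7', '8', '9'] := by
      intro p hp
      exact h p (by simp [PySem.List.enumerate_cons, hp])
    rw [PySem.List.enumerate_cons, PySem.List.enumerate_cons, List.map_cons, List.map_cons,
      join_cons, join_cons, tnStep_odd c n hn hc, tnStep_even d (n + 1) hn1,
      ih (n + 1 + 1) hn2 hrest, tnGo, String.append_assoc]

-- ===== VERDICT (by name: the statement is the Claim_ definition above) =====
theorem transform_number_spec : Claim_equal_transform_number := by
  intro s _ hpre
  unfold Spec_transform_number transform_number transform_number_alt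
  exact tnGo_eq s.toList 1 (by decide) hpre
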